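-- pv_equiv track=rewrite | github.com/allenhyp/LeetCodePractice | Amazon_Find_The_Highest_Profit.py | find_profit
-- ===== SOURCE A (Python) =====
-- from typing import List
-- import heapq
--
-- def find_profit(inventory: List[int], order: int) -> int:
--     pq = [-inv for inv in inventory]
--     heapq.heapify(pq)
--     res = 0
--     for i in range(order):
--         sell = heapq.heappop(pq)
--         res -= sell
--         heapq.heappush(pq, sell + 1)
--     return res
-- ===== SOURCE B (Python) =====
-- from typing import List
--
-- def find_profit(inventory: List[int], order: int) -> int:
--     # Sort descending, run-length-encode equal values, then sell whole "levels"
--     # in batches using arithmetic-series sums instead of simulating the heap.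
--     vals = sorted(inventory, reverse=True)
--     groups = []
--     i, n = 0, len(vals)
--     while i < n:
--         j = i
--         while j < n and vals[j] == vals[i]:
--             j += 1
--         groups.append((vals[i], j - i))
--         i = j
--     res = 0
--     rem = order
--     width = 0
--     for idx, (v, c) in enumerate(groups):
--         width += c
--         if rem <= 0:
--             break
--         if idx + 1 < len(groups):
--             floor = groups[idx + 1][0]
--             cap = width * (v - floor)
--             if rem > cap:
--                 res += width * ((v + floor + 1) * (v - floor)) // 2
--                 rem -= cap
--                 continue
--         q, r = divmod(rem, width)
--         res += width * ((2 * v - q + 1) * q) // 2 + r * (v - q)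
--         rem = 0
--         break
--     return res
-- ===== Notes on version B (the rewrite author's own statement) =====
-- stated objective: alternative
-- what changed: A simulates every single sale with a max-heap (pop the max, push max-1, order times); B sorts the inventory descending once, run-length-encodes equal values, and sells whole price levels in batches via closed-form arithmetic-series sums with one final divmod, so its cost depends on the inventory size instead of the order count.
import Mathlib
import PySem

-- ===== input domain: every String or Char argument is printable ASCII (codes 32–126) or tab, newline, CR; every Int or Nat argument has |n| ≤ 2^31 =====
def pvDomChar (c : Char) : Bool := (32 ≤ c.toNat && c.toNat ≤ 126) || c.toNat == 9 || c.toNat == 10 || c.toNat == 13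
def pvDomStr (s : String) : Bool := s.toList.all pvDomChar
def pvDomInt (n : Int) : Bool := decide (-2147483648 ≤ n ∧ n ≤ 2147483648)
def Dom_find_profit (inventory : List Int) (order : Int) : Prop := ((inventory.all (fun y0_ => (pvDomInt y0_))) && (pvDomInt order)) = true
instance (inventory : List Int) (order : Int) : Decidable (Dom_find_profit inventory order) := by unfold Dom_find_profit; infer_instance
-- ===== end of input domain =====

-- B replaces A's one-sale-at-a-time heap simulation by sort + run-length grouping +
-- arithmetic-series batch sums over whole price levels (different algorithm, cost shifts
-- from the order count to the inventory size).

-- ===== PORT A =====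
-- heapq is ported by its contract: heappop removes and returns a minimum element,
-- heappush adds an element; heapify is the identity on the element multiset.
def find_profit (inventory : List Int) (order : Int) : Int :=
  let pq := inventory.map (fun inv => -inv)
  (((PySem.List.pyRange 0 order 1).foldl
    (fun (st : Int × List Int) _ =>
      match PySem.List.min? st.2 (fun x => x) with
      | none => st            -- heappop([]) raises IndexError: excluded by Pre_find_profit
      | some sell => (st.1 - sell, st.2.erase sell ++ [sell + 1]))
    (0, pq))).1

-- ===== PORT B =====
-- run scanner for the inner while loop of Source B: length of the prefix equal to v, and the rest
def pvSpan (v : Int) : List Int → Nat × List Int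
  | [] => (0, [])
  | x :: xs => if x = v then ((pvSpan v xs).1 + 1, (pvSpan v xs).2) else (0, x :: xs)

theorem pvSpan_len_le (v : Int) : ∀ l : List Int, (pvSpan v l).2.length ≤ l.length := by
  intro l; induction l with
  | nil => simp [pvSpan]
  | cons x xs ih =>
      by_cases h : x = v
      · simp [pvSpan, h]; omega
      · simp [pvSpan, h]

-- run-length encoding of the sorted list (Source B's outer while loop)
def pvGroups : List Int → List (Int × Int)
  | [] => []
  | v :: rest => (v, ((pvSpan v rest).1 : Int) + 1) :: pvGroups (pvSpan v rest).2
termination_by l => l.length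
decreasing_by simpa using Nat.lt_succ_of_le (pvSpan_len_le v rest)

-- the final (q, r = divmod(rem, width)) batch of Source B
def pvTerminal (res rem width v : Int) : Int :=
  res + PySem.Int.floordiv (width * ((2 * v - PySem.Int.floordiv rem width + 1) * PySem.Int.floordiv rem width)) 2
      + PySem.Int.mod rem width * (v - PySem.Int.floordiv rem width)

-- Source B's for-loop over the groups (continue = recursive call, break = stop)
def pvSell (res rem width : Int) : List (Int × Int) → Int
  | [] => res
  | (v, c) :: rest =>
      let width' := width + c
      if rem ≤ 0 then res
      else
        match rest with
        | (f, _) :: _ =>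
            let cap := width' * (v - f)
            if rem > cap then
              pvSell (res + PySem.Int.floordiv (width' * ((v + f + 1) * (v - f))) 2) (rem - cap) width' rest
            else pvTerminal res rem width' v
        | [] => pvTerminal res rem width' v

def find_profit_alt (inventory : List Int) (order : Int) : Int :=
  pvSell 0 order 0 (pvGroups (PySem.List.sorted inventory (fun x => x) true))

-- ===== PRECONDITION & SPEC =====
-- Pre_ excludes only inputs where A raises: heappop of an empty heap (empty inventory with order ≥ 1).
def Pre_find_profit (inventory : List Int) (order : Int) : Prop := inventory ≠ [] ∨ order ≤ 0
instance (inventory : List Int) (order : Int) : Decidable (Pre_find_profit inventory order) := by unfold Pre_find_profit; infer_instance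
def pvWitness_find_profit : List Int × Int := ([3, 5], 4)

def Spec_find_profit (inventory : List Int) (order : Int) (out : Int) : Prop := out = find_profit_alt inventory order
instance (inventory : List Int) (order : Int) (out : Int) : Decidable (Spec_find_profit inventory order out) := by unfold Spec_find_profit; infer_instance

-- ===== CLAIM (what is proved, stated in full; the proofs are below) =====
def Claim_equal_find_profit : Prop := ∀ (inventory : List Int) (order : Int), Dom_find_profit inventory order → Pre_find_profit inventory order → Spec_find_profit inventory order (find_profit inventory order)

-- ===== LEMMAS AND PROOFS =====

-- Canonical state: the inventory values, sorted descending.  One sale = pop the head v, put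
-- back v-1 in order.  gD m s = revenue of m sales from state s.
def insD (x : Int) : List Int → List Int
  | [] => [x]
  | y :: ys => if x < y then y :: insD x ys else x :: y :: ys

def gD : Nat → List Int → Int
  | 0, _ => 0
  | _ + 1, [] => 0
  | m + 1, v :: s => v + gD m (insD (v - 1) s)

theorem gD_nil (m : Nat) : gD m ([] : List Int) = 0 := by cases m <;> rfl

theorem insD_perm (x : Int) (l : List Int) : (insD x l).Perm (x :: l) := by
  induction l with
  | nil => simp [insD]
  | cons y ys ih =>
      by_cases h : x < y
      · simpa [insD, h] using ((ih.cons y).trans (List.Perm.swap x y ys))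
      · simp [insD, h]

theorem insD_pairwise (x : Int) (l : List Int) (h : l.Pairwise (fun a b : Int => b ≤ a)) :
    (insD x l).Pairwise (fun a b : Int => b ≤ a) := by
  induction l with
  | nil => simp [insD]
  | cons y ys ih =>
      rcases List.pairwise_cons.1 h with ⟨hy, hys⟩
      by_cases hxy : x < y
      · rw [insD, if_pos hxy]
        refine List.pairwise_cons.2 ⟨?_, ih hys⟩
        intro z hz
        rcases List.mem_cons.1 ((insD_perm x ys).mem_iff.1 hz) with rfl | hz
        · exact le_of_lt hxy
        · exact hy z hz
      · rw [insD, if_neg hxy]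
        refine List.pairwise_cons.2 ⟨?_, h⟩
        intro z hz
        rcases List.mem_cons.1 hz with rfl | hz
        · exact not_lt.1 hxy
        · exact le_trans (hy z hz) (not_lt.1 hxy)

theorem insD_append_of_lt (x : Int) (p t : List Int) (h : ∀ y ∈ p, x < y) :
    insD x (p ++ t) = p ++ insD x t := by
  induction p with
  | nil => simp
  | cons y ys ih =>
      have hy : x < y := h y (by simp)
      simp [insD, hy, ih fun z hz => h z (by simp [hz])]

theorem insD_head_le (x : Int) (t : List Int) (h : ∀ y ∈ t, y ≤ x) : insD x t = x :: t := by
  cases t with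
  | nil => rfl
  | cons y ys => simp [insD, not_lt.2 (h y (by simp))]

def sumTop (v : Int) : Nat → Int
  | 0 => 0
  | q + 1 => v + sumTop (v - 1) q

theorem two_mul_sumTop (q : Nat) : ∀ v : Int, 2 * sumTop v q = (2 * v - q + 1) * q := by
  induction q with
  | zero => intro v; simp [sumTop]
  | succ q ih =>
      intro v
      rw [sumTop, mul_add, ih (v - 1)]
      push_cast; ring

theorem fd_two_mul (x : Int) : PySem.Int.floordiv (2 * x) 2 = x := by
  rw [PySem.Int.floordiv_eq_ediv_of_pos (by norm_num)]
  exact Int.mul_ediv_cancel_left x (by norm_num)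

-- one full price level: a items at v sell a times at price v and land at v-1
theorem gD_level (a : Nat) : ∀ (m : Nat) (v : Int) (t : List Int), (∀ y ∈ t, y ≤ v - 1) →
    gD (a + m) (List.replicate a v ++ t) = a * v + gD m (List.replicate a (v - 1) ++ t) := by
  induction a with
  | zero => intro m v t _; simp
  | succ a ih =>
      intro m v t ht
      have hstep : a + 1 + m = (a + m) + 1 := by omega
      rw [hstep, List.replicate_succ, List.cons_append, gD]
      have hins : insD (v - 1) (List.replicate a v ++ t) = List.replicate a v ++ ((v - 1) :: t) := by
        rw [insD_append_of_lt _ _ _ (fun y hy => by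
              rw [List.eq_of_mem_replicate hy]; omega),
            insD_head_le _ _ ht]
      rw [hins, ih m v ((v - 1) :: t) (by
            intro y hy; rcases List.mem_cons.1 hy with rfl | hy
            · omega
            · exact ht y hy)]
      have : List.replicate a (v - 1) ++ ((v - 1) :: t) = List.replicate (a + 1) (v - 1) ++ t := by
        rw [List.replicate_succ', List.append_assoc]; simp
      rw [this]; push_cast; ring

-- q full price levels
theorem gD_levels (q : Nat) : ∀ (k m : Nat) (v : Int) (t : List Int),
    (∀ y ∈ t, y ≤ v - q) →
    gD (k * q + m) (List.replicate k v ++ t)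
      = k * sumTop v q + gD m (List.replicate k (v - q) ++ t) := by
  induction q with
  | zero => intro k m v t _; simp [sumTop]
  | succ q ih =>
      intro k m v t ht
      have hsplit : k * (q + 1) + m = k + (k * q + m) := by ring
      rw [hsplit, gD_level k (k * q + m) v t (by
            intro y hy; have := ht y hy; push_cast at this ⊢; omega)]
      rw [ih k m (v - 1) t (by
            intro y hy; have := ht y hy; push_cast at this ⊢; omega)]
      have hv : v - 1 - q = v - (q + 1 : Nat) := by push_cast; ring
      rw [hv, sumTop]
      push_cast; ring

-- the remainder: r < k sales from a block of k items all at u, everything else strictly below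
theorem gD_rem (r : Nat) : ∀ (k : Nat) (u : Int) (t : List Int), r ≤ k → (∀ y ∈ t, y < u) →
    gD r (List.replicate k u ++ t) = r * u := by
  induction r with
  | zero => intro k u t _ _; simp [gD]
  | succ r ih =>
      intro k u t hrk ht
      obtain ⟨k', rfl⟩ : ∃ k', k = k' + 1 := ⟨k - 1, by omega⟩
      rw [List.replicate_succ, List.cons_append, gD]
      have hins : insD (u - 1) (List.replicate k' u ++ t) = List.replicate k' u ++ insD (u - 1) t :=
        insD_append_of_lt _ _ _ (fun y hy => by rw [List.eq_of_mem_replicate hy]; omega)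
      rw [hins, ih k' u (insD (u - 1) t) (by omega) (by
            intro y hy
            rcases List.mem_cons.1 ((insD_perm (u - 1) t).mem_iff.1 hy) with rfl | hy
            · omega
            · exact ht y hy)]
      push_cast; ring

-- the closing batch: equals Source B's divmod formula
theorem gD_terminal (res width v rem : Int) (t : List Int) (hw : 1 ≤ width) (hrem : 0 < rem)
    (ht1 : ∀ y ∈ t, y ≤ v - PySem.Int.floordiv rem width)
    (ht2 : 0 < PySem.Int.mod rem width → ∀ y ∈ t, y < v - PySem.Int.floordiv rem width) :
    res + gD rem.toNat (List.replicate width.toNat v ++ t) = pvTerminal res rem width v := by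
  have hwpos : (0 : Int) < width := by omega
  set q := PySem.Int.floordiv rem width with hqdef
  set r := PySem.Int.mod rem width with hrdef
  have hq0 : 0 ≤ q := by
    rw [hqdef, PySem.Int.floordiv_eq_ediv_of_pos hwpos]
    exact Int.ediv_nonneg (by omega) (by omega)
  have hr0 : 0 ≤ r := hrdef ▸ PySem.Int.mod_nonneg rem hwpos
  have hrw : r < width := hrdef ▸ PySem.Int.mod_lt rem hwpos
  have hsum : q * width + r = rem := PySem.Int.floordiv_mul_add_mod rem width
  have hcastq : ((q.toNat : Int)) = q := Int.toNat_of_nonneg hq0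
  have hcastw : ((width.toNat : Int)) = width := Int.toNat_of_nonneg (by omega)
  have hcastr : ((r.toNat : Int)) = r := Int.toNat_of_nonneg hr0
  have hnat : rem.toNat = width.toNat * q.toNat + r.toNat := by
    have h1 : rem = width * q + r := by linarith
    rw [h1, Int.toNat_add (mul_nonneg (by omega) hq0) hr0, Int.toNat_mul (by omega) hq0]
  rw [hnat, gD_levels q.toNat width.toNat r.toNat v t (by
        intro y hy; rw [hcastq]; exact ht1 y hy)]
  have hgdr : gD r.toNat (List.replicate width.toNat (v - (q.toNat : Int)) ++ t) = r * (v - q) := by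
    by_cases h0 : r = 0
    · rw [show r.toNat = 0 from by omega]
      simp [gD, h0]
    · have hrpos : 0 < r := by omega
      rw [gD_rem r.toNat width.toNat (v - (q.toNat : Int)) t (by omega) (by
            intro y hy; rw [hcastq]; exact lt_of_lt_of_le (ht2 hrpos y hy) (by omega)),
          hcastr, hcastq]
  rw [hgdr]
  unfold pvTerminal
  rw [← hqdef, ← hrdef]
  have h2 : width * ((2 * v - q + 1) * q) = 2 * ((width.toNat : Int) * sumTop v q.toNat) := by
    have h3 : (2 : Int) * sumTop v q.toNat = (2 * v - q + 1) * q := by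
      rw [two_mul_sumTop q.toNat v, hcastq]
    rw [hcastw]
    nlinarith [h3]
  rw [h2, fd_two_mul]
  ring

def expandG (gs : List (Int × Int)) : List Int := gs.flatMap (fun g => List.replicate g.2.toNat g.1)

-- well-formed run-length encoding: values strictly decreasing and below b, counts ≥ 1
def GWF : Int → List (Int × Int) → Prop
  | _, [] => True
  | b, (v, _c) :: gs => v < b ∧ 1 ≤ _c ∧ GWF v gs

theorem GWF_expand_lt : ∀ (gs : List (Int × Int)) (b : Int), GWF b gs → ∀ y ∈ expandG gs, y < b := by
  intro gs
  induction gs with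
  | nil => intro b _ y hy; simp [expandG] at hy
  | cons g gs ih =>
      intro b hb y hy
      obtain ⟨v, c⟩ := g
      rcases hb with ⟨hvb, hc, hgs⟩
      rw [show expandG ((v, c) :: gs) = List.replicate c.toNat v ++ expandG gs from by
            simp [expandG]] at hy
      rcases List.mem_append.1 hy with hy | hy
      · rw [List.eq_of_mem_replicate hy]; exact hvb
      · exact lt_trans (ih v hgs y hy) hvb

theorem pvSpan_eq (v : Int) : ∀ l : List Int, l = List.replicate (pvSpan v l).1 v ++ (pvSpan v l).2 := by
  intro l; induction l with
  | nil => simp [pvSpan]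
  | cons x xs ih =>
      by_cases h : x = v
      · subst h
        rw [pvSpan]
        simp only [if_pos]
        rw [List.replicate_succ, List.cons_append]
        exact congrArg (x :: ·) ih
      · simp [pvSpan, h]

theorem pvSpan_head_ne (v : Int) : ∀ (l : List Int) (y : Int), y ∈ (pvSpan v l).2.head? → y ≠ v := by
  intro l; induction l with
  | nil => intro y hy; simp [pvSpan] at hy
  | cons x xs ih =>
      intro y hy
      by_cases h : x = v
      · subst h; rw [pvSpan] at hy; simp only [if_pos] at hy; exact ih y hy
      · rw [pvSpan] at hy; simp only [if_neg h] at hy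
        simp at hy; subst hy; exact h

theorem expandG_cons (v c : Int) (gs : List (Int × Int)) :
    expandG ((v, c) :: gs) = List.replicate c.toNat v ++ expandG gs := by simp [expandG]

theorem pvGroups_spec : ∀ l : List Int, l.Pairwise (fun a b : Int => b ≤ a) →
    expandG (pvGroups l) = l ∧ ∀ b : Int, (∀ y ∈ l, y < b) → GWF b (pvGroups l) := by
  intro l
  induction l using pvGroups.induct with
  | case1 => intro _; exact ⟨by simp [pvGroups, expandG], fun b _ => by simp [pvGroups, GWF]⟩
  | case2 v rest ih =>
      intro hp
      rcases List.pairwise_cons.1 hp with ⟨hv, hrest⟩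
      have hdecomp : rest = List.replicate (pvSpan v rest).1 v ++ (pvSpan v rest).2 :=
        pvSpan_eq v rest
      have hpr : (pvSpan v rest).2.Pairwise (fun a b : Int => b ≤ a) :=
        (List.pairwise_append.1 (hdecomp ▸ hrest)).2.1
      have hlt : ∀ y ∈ (pvSpan v rest).2, y < v := by
        cases hh : (pvSpan v rest).2 with
        | nil => simp
        | cons h r' =>
            have hne : h ≠ v := pvSpan_head_ne v rest h (by simp [hh])
            have hhv : h < v :=
              lt_of_le_of_ne (hv h (by rw [hdecomp, hh]; simp)) hne
            intro y hy
            rcases List.mem_cons.1 hy with rfl | hy'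
            · exact hhv
            · have hpr' := hpr; rw [hh] at hpr'
              exact lt_of_le_of_lt ((List.pairwise_cons.1 hpr').1 y hy') hhv
      obtain ⟨ih1, ih2⟩ := ih hpr
      rw [pvGroups]
      constructor
      · rw [expandG_cons, ih1]
        have : ((pvSpan v rest).1 + 1 : Int).toNat = (pvSpan v rest).1 + 1 := by omega
        rw [this, List.replicate_succ, List.cons_append]
        exact congrArg (v :: ·) hdecomp.symm
      · intro b hb
        exact ⟨hb v (by simp), by omega, ih2 v hlt⟩

-- Source B's group loop computes gD of the expanded state
theorem pvSell_eq_gD : ∀ (gs : List (Int × Int)) (v c w res rem : Int), 0 ≤ w → 1 ≤ c → GWF v gs →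
    pvSell res rem w ((v, c) :: gs)
      = res + gD rem.toNat (List.replicate (w + c).toNat v ++ expandG gs) := by
  intro gs
  induction gs with
  | nil =>
      intro v c w res rem hw hc _
      by_cases hrem : rem ≤ 0
      · simp [pvSell, hrem, show rem.toNat = 0 from by omega, gD]
      · have hrpos : 0 < rem := by omega
        rw [show pvSell res rem w [(v, c)] = pvTerminal res rem (w + c) v from by
              simp [pvSell, hrem]]
        rw [show expandG [] = ([] : List Int) from by simp [expandG]]
        exact (gD_terminal res (w + c) v rem [] (by omega) hrpos (by simp) (fun _ => by simp)).symm
  | cons g gs' ih =>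
      obtain ⟨f, cf⟩ := g
      intro v c w res rem hw hc hgwf
      obtain ⟨hfv, hcf, hgwf'⟩ := hgwf
      by_cases hrem : rem ≤ 0
      · simp [pvSell, hrem, show rem.toNat = 0 from by omega, gD]
      · have hrpos : 0 < rem := by omega
        have hwidth : (1 : Int) ≤ w + c := by omega
        have htle : ∀ y ∈ expandG ((f, cf) :: gs'), y ≤ f := by
          intro y hy
          rw [expandG_cons] at hy
          rcases List.mem_append.1 hy with hy | hy
          · rw [List.eq_of_mem_replicate hy]
          · exact le_of_lt (GWF_expand_lt gs' f hgwf' y hy)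
        have hvf : (0 : Int) < v - f := by omega
        have hcastvf : (((v - f).toNat : Int)) = v - f := Int.toNat_of_nonneg (by omega)
        by_cases hcap : rem > (w + c) * (v - f)
        · rw [show pvSell res rem w ((v, c) :: (f, cf) :: gs')
                = pvSell (res + PySem.Int.floordiv ((w + c) * ((v + f + 1) * (v - f))) 2)
                    (rem - (w + c) * (v - f)) (w + c) ((f, cf) :: gs') from by
              simp only [pvSell]
              rw [if_neg (by omega), if_pos hcap]]
          rw [ih f cf (w + c) _ _ (by omega) hcf hgwf']
          have hcap0 : (0 : Int) ≤ (w + c) * (v - f) := mul_nonneg (by omega) (by omega)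
          have h1 : (((w + c).toNat * (v - f).toNat : Nat) : Int) = (w + c) * (v - f) := by
            push_cast
            rw [Int.toNat_of_nonneg (by omega), hcastvf]
          have hnat : rem.toNat = (w + c).toNat * (v - f).toNat + (rem - (w + c) * (v - f)).toNat := by
            omega
          rw [hnat, gD_levels (v - f).toNat (w + c).toNat _ v (expandG ((f, cf) :: gs')) (by
                intro y hy
                rw [hcastvf]
                have := htle y hy
                omega)]
          have hrepl : List.replicate (w + c).toNat (v - ((v - f).toNat : Int)) ++ expandG ((f, cf) :: gs')
              = List.replicate ((w + c) + cf).toNat f ++ expandG gs' := by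
            rw [hcastvf, show v - (v - f) = f from by ring, expandG_cons,
                show ((w + c) + cf).toNat = (w + c).toNat + cf.toNat from by omega,
                List.replicate_add, List.append_assoc]
          rw [hrepl]
          have hfd : PySem.Int.floordiv ((w + c) * ((v + f + 1) * (v - f))) 2
              = ((w + c).toNat : Int) * sumTop v (v - f).toNat := by
            have h3 : (2 : Int) * sumTop v (v - f).toNat = (v + f + 1) * (v - f) := by
              rw [two_mul_sumTop (v - f).toNat v, hcastvf]; ring
            rw [Int.toNat_of_nonneg (show (0:Int) ≤ w + c from by omega)]
            rw [show (w + c) * ((v + f + 1) * (v - f)) = 2 * ((w + c) * sumTop v (v - f).toNat) from by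
                  nlinarith [h3]]
            exact fd_two_mul _
          rw [hfd]
          ring
        · rw [show pvSell res rem w ((v, c) :: (f, cf) :: gs')
                = pvTerminal res rem (w + c) v from by
              simp only [pvSell]
              rw [if_neg (by omega), if_neg hcap]]
          have hqle : PySem.Int.floordiv rem (w + c) ≤ v - f := by
            have := (PySem.Int.floordiv_lt_iff_lt_mul (a := rem) (b := w + c)
              (q := v - f + 1) (by omega)).2 (by nlinarith)
            omega
          refine (gD_terminal res (w + c) v rem (expandG ((f, cf) :: gs')) (by omega) hrpos
            (fun y hy => by have := htle y hy; omega) (fun hrm y hy => ?_)).symm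
          have hqlt : PySem.Int.floordiv rem (w + c) < v - f := by
            rcases lt_or_eq_of_le hqle with h | h
            · exact h
            · exfalso
              have hdvd : (w + c) ∣ rem := by
                have hsum := PySem.Int.floordiv_mul_add_mod rem (w + c)
                have hr0 : PySem.Int.mod rem (w + c) = 0 := by
                  by_contra hne
                  have h1 : 0 < PySem.Int.mod rem (w + c) := by
                    have := PySem.Int.mod_nonneg rem (show (0:Int) < w + c from by omega)
                    omega
                  nlinarith [hsum, h]
                exact (PySem.Int.mod_eq_zero_iff_dvd rem (w + c)).1 hr0
              have hsum := PySem.Int.floordiv_mul_add_mod rem (w + c)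
              have hr0 : PySem.Int.mod rem (w + c) = 0 := (PySem.Int.mod_eq_zero_iff_dvd rem (w + c)).2 hdvd
              nlinarith [hsum]
          have := htle y hy
          omega

-- A's heap loop computes gD of the sorted-descending state
theorem A_loop (L : List Int) : ∀ (pq s : List Int) (res : Int),
    pq.Perm (s.map (fun z => -z)) → s.Pairwise (fun a b : Int => b ≤ a) →
    ((L.foldl (fun (st : Int × List Int) _ =>
      match PySem.List.min? st.2 (fun x => x) with
      | none => st
      | some sell => (st.1 - sell, st.2.erase sell ++ [sell + 1])) (res, pq))).1
      = res + gD L.length s := by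
  induction L with
  | nil => intro pq s res _ _; simp [gD]
  | cons a L ih =>
      intro pq s res hperm hsort
      cases s with
      | nil =>
          have hpq : pq = [] := hperm.eq_nil
          subst hpq
          rw [List.foldl_cons]
          simp only [show PySem.List.min? ([] : List Int) (fun x : Int => x) = none from
            (PySem.List.min?_eq_none_iff _ _).2 rfl]
          rw [ih [] [] res (by simp) (by simp)]
          simp [gD_nil]
      | cons v tail =>
          have hne : pq ≠ [] := by
            intro h
            have := hperm.length_eq
            simp [h] at this
          obtain ⟨m, hm⟩ : ∃ m, PySem.List.min? pq (fun x => x) = some m := by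
            cases h : PySem.List.min? pq (fun x => x) with
            | none => exact absurd ((PySem.List.min?_eq_none_iff _ _).1 h) hne
            | some m => exact ⟨m, rfl⟩
          have hmem : m ∈ pq := PySem.List.min?_mem hm
          have hmin : ∀ y ∈ pq, m ≤ y := fun y hy => PySem.List.min?_isMin hm y hy
          rcases List.pairwise_cons.1 hsort with ⟨hv, htail⟩
          have hmv : m = -v := by
            have h1 : m ≤ -v := hmin _ (hperm.mem_iff.2 (by simp))
            have h2 : -v ≤ m := by
              rcases List.mem_map.1 (hperm.mem_iff.1 hmem) with ⟨z, hz, rfl⟩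
              rcases List.mem_cons.1 hz with rfl | hz
              · exact le_refl _
              · exact neg_le_neg (hv z hz)
            omega
          subst hmv
          rw [List.foldl_cons]
          simp only [hm]
          have hperm' : (pq.erase (-v) ++ [-v + 1]).Perm
              ((insD (v - 1) tail).map (fun z => -z)) := by
            have e1 : (pq.erase (-v)).Perm (tail.map (fun z => -z)) := by
              have := hperm.erase (-v)
              simpa [List.map_cons, List.erase_cons_head] using this
            have e2 : (pq.erase (-v) ++ [-v + 1]).Perm ((-v + 1) :: tail.map (fun z => -z)) :=
              (e1.append_right [-v + 1]).trans (List.perm_append_singleton _ _)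
            refine e2.trans ?_
            have e3 : ((insD (v - 1) tail).map (fun z => -z)).Perm
                (((v - 1) :: tail).map (fun z => -z)) := (insD_perm (v - 1) tail).map _
            refine List.Perm.symm (e3.trans ?_)
            simp only [List.map_cons]
            have : -(v - 1) = -v + 1 := by ring
            rw [this]
          have hsort' := insD_pairwise (v - 1) tail htail
          rw [ih _ _ _ hperm' hsort']
          show res - -v + gD L.length (insD (v - 1) tail) = res + gD (L.length + 1) (v :: tail)
          rw [gD]
          ring

theorem A_eq (inventory : List Int) (order : Int) :
    find_profit inventory order
      = gD order.toNat (PySem.List.sorted inventory (fun x => x) true) := by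
  have hperm : (inventory.map (fun inv => -inv)).Perm
      ((PySem.List.sorted inventory (fun x => x) true).map (fun z => -z)) :=
    (PySem.List.sorted_perm inventory (fun x => x) true).symm.map _
  have hsort : (PySem.List.sorted inventory (fun x => x) true).Pairwise
      (fun a b : Int => b ≤ a) := by
    simpa using PySem.List.sorted_pairwise_rev (xs := inventory) (key := fun x => x)
  have h := A_loop (PySem.List.pyRange 0 order 1) _ _ 0 hperm hsort
  unfold find_profit
  rw [h, PySem.List.length_pyRange_one]
  norm_num

theorem B_eq (inventory : List Int) (order : Int) :
    find_profit_alt inventory order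
      = gD order.toNat (PySem.List.sorted inventory (fun x => x) true) := by
  unfold find_profit_alt
  cases hs : PySem.List.sorted inventory (fun x => x) true with
  | nil => rw [pvGroups]; simp [pvSell, gD_nil]
  | cons v rest =>
      have hp : (v :: rest).Pairwise (fun a b : Int => b ≤ a) := by
        have h0 := PySem.List.sorted_pairwise_rev (xs := inventory) (key := fun x => x)
        rw [hs] at h0
        simpa using h0
      obtain ⟨hexp, hgwf⟩ := pvGroups_spec _ hp
      have hgwf' : GWF v (pvGroups (pvSpan v rest).2) := by
        have h1 := hgwf (v + 1) (by
          intro y hy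
          rcases List.mem_cons.1 hy with rfl | hy
          · omega
          · have := (List.pairwise_cons.1 hp).1 y hy; omega)
        rw [pvGroups] at h1
        exact h1.2.2
      rw [pvGroups]
      rw [pvSell_eq_gD (pvGroups (pvSpan v rest).2) v (((pvSpan v rest).1 : Int) + 1)
            0 0 order le_rfl (by omega) hgwf']
      rw [pvGroups, expandG_cons] at hexp
      rw [zero_add, zero_add, hexp]

-- ===== VERDICT (by name: the statement is the Claim_ definition above) =====
theorem find_profit_spec : Claim_equal_find_profit := by
  intro inventory order _ _
  unfold Spec_find_profit
  rw [A_eq, B_eq]
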